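-- pv_equiv track=rewrite | github.com/tomo5610/No1 | no_3.py | find_min_number
-- ===== SOURCE A (Python) =====
-- def find_min_number(x):
--
--     digits = list(x)
--
--     digits.sort()
--
--     # 先頭に0が来ないようにするため、最初に0以外の数字を見つける
--     if digits[0] == '0':
--         for i in range(1, len(digits)):
--             if digits[i] != '0':
--                 # 最初に0以外の数字を先頭に持ってくる
--                 digits[0], digits[i] = digits[i], '0'
--                 break
--
--     min_value = ''.join(digits)
--     return min_value
-- ===== SOURCE B (Python) =====
-- def find_min_number(x):
--     # Counting sort over the character codes (O(n + 128)) instead of a comparison sort,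
--     # then splice the first nonzero digit character to the front.
--     cnt = {}
--     for ch in x:
--         cnt[ch] = cnt.get(ch, 0) + 1
--     s = []
--     for c in range(128):
--         s.extend([chr(c)] * cnt.get(chr(c), 0))
--     z = cnt.get('0', 0)
--     if s[:1] == ['0'] and z < len(s):
--         s = [s[z]] + ['0'] * z + s[z + 1:]
--     return ''.join(s)
-- ===== Notes on version B (the rewrite author's own statement) =====
-- stated objective: alternative
-- what changed: Replaces the comparison sort plus index-scanning swap loop with a counting sort over the 128 ASCII codes followed by a direct splice of the first nonzero digit character to the front.
import Mathlib
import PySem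

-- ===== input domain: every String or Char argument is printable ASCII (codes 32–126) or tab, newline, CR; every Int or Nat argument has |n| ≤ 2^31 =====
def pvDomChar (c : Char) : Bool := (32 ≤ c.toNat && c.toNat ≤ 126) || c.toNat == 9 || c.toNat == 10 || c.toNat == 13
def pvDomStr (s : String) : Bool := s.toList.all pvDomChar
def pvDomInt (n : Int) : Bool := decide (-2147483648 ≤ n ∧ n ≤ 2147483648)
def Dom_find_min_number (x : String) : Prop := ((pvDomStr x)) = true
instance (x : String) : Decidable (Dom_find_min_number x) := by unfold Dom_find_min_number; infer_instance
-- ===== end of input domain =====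

-- B replaces A's comparison sort + index-scan swap loop by a counting sort over the
-- 128 ASCII codes followed by a direct splice of the first nonzero digit character to the front
-- (alternative algorithm; equivalence of return values proved below).


-- ===== PORT A =====
-- the for-loop 'for i in range(1, len(digits)): if digits[i] != '0': swap; break'
def pvSwapA (ds : List Char) : List Int → List Char
  | [] => ds
  | i :: rest =>
    if PySem.List.pyGetD ds i ' ' ≠ '0' then
      (ds.set 0 (PySem.List.pyGetD ds i ' ')).set i.toNat '0'
    else pvSwapA ds rest

def find_min_number (x : String) : String :=
  let digits := PySem.List.sorted x.toList (fun c => c) false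
  match PySem.List.pyGet? digits 0 with
  | none => ""   -- digits[0] raises IndexError on the empty string; excluded by Pre_
  | some d0 =>
    let digits2 := if d0 = '0' then pvSwapA digits (PySem.List.pyRange 1 (PySem.List.len digits) 1) else digits
    String.mk digits2

-- ===== PORT B =====
def find_min_number_alt (x : String) : String :=
  let cnt := x.toList.foldl (fun d ch => d.modify ch 0 (· + 1)) (PySem.Dict.empty : PySem.Dict Char Int)
  let s := (PySem.List.pyRange 0 128 1).foldl
      (fun acc c => acc ++ PySem.List.pyRepeat [Char.ofNat c.toNat] (cnt.getD (Char.ofNat c.toNat) 0)) ([] : List Char)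
  let z := cnt.getD '0' 0
  let s2 := if PySem.List.slice s none (some 1) = ['0'] ∧ z < PySem.List.len s then
      [PySem.List.pyGetD s z ' '] ++ PySem.List.pyRepeat ['0'] z ++ PySem.List.slice s (some (z + 1)) none
    else s
  String.mk s2

-- ===== PRECONDITION & SPEC =====
-- Pre_ excludes only the empty string, on which A raises IndexError (digits[0]).
def Pre_find_min_number (x : String) : Prop := x ≠ ""
instance (x : String) : Decidable (Pre_find_min_number x) := by unfold Pre_find_min_number; infer_instance
def pvWitness_find_min_number : String := "100"

def Spec_find_min_number (x : String) (out : String) : Prop := out = find_min_number_alt x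
instance (x : String) (out : String) : Decidable (Spec_find_min_number x out) := by unfold Spec_find_min_number; infer_instance

-- ===== CLAIM (what is proved, stated in full; the proofs are below) =====
def Claim_equal_find_min_number : Prop := ∀ (x : String), Dom_find_min_number x → Pre_find_min_number x → Spec_find_min_number x (find_min_number x)

-- ===== LEMMAS AND PROOFS =====
theorem pv_toNat_ofNat (k : Nat) (h : k < 128) : (Char.ofNat k).toNat = k := by
  unfold Char.ofNat
  rw [dif_pos (by unfold Nat.isValidChar; omega)]
  simp [Char.ofNatAux, Char.toNat]
theorem pv_sum_single (f : Nat → Nat) (t : Nat) : ∀ n, t < n →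
    ((List.range n).map (fun k => if k = t then f k else 0)).sum = f t := by
  intro n
  induction n with
  | zero => omega
  | succ m ih =>
    intro ht
    rw [List.range_succ, List.map_append, List.sum_append]
    by_cases hm : t = m
    · subst hm
      have h0 : ((List.range t).map (fun k => if k = t then f k else 0)).sum = 0 := by
        apply List.sum_eq_zero
        intro y hy
        simp only [List.mem_map, List.mem_range] at hy
        obtain ⟨i, hi, rfl⟩ := hy
        simp [Nat.ne_of_lt hi]
      simp [h0]
    · rw [ih (by omega)]
      simp [show m ≠ t by omega]

def pvBuckets (l : List Char) : List Char :=
  (List.range 128).flatMap (fun k => List.replicate (l.count (Char.ofNat k)) (Char.ofNat k))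

theorem pvBuckets_count (l : List Char) (h : ∀ c ∈ l, c.toNat < 128) (a : Char) :
    (pvBuckets l).count a = l.count a := by
  unfold pvBuckets
  rw [List.flatMap, List.count_flatten, List.map_map]
  by_cases ha : a.toNat < 128
  · have hmap : List.map (List.count a ∘ fun k => List.replicate (l.count (Char.ofNat k)) (Char.ofNat k)) (List.range 128)
        = List.map (fun k => if k = a.toNat then l.count a else 0) (List.range 128) := by
      apply List.map_congr_left
      intro k hk
      simp only [List.mem_range] at hk
      simp only [Function.comp_apply, List.count_replicate]
      by_cases hek : Char.ofNat k = a
      · have : k = a.toNat := by rw [← hek, pv_toNat_ofNat k hk]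
        simp [this]
      · rw [if_neg (by simpa using hek), if_neg (by
          intro hkt
          exact hek (by rw [hkt, Char.ofNat_toNat]))]
    rw [hmap, pv_sum_single (fun _ => l.count a) a.toNat 128 ha]
  · have hnotmem : a ∉ l := fun hm => ha (h a hm)
    rw [List.count_eq_zero.mpr hnotmem]
    apply List.sum_eq_zero
    intro y hy
    simp only [List.mem_map, List.mem_range] at hy
    obtain ⟨k, hk, rfl⟩ := hy
    simp only [Function.comp_apply, List.count_replicate]
    rw [if_neg]
    simp only [beq_iff_eq]
    intro hek
    exact ha (by rw [← hek, pv_toNat_ofNat k hk]; exact hk)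

theorem pvBuckets_pairwise (l : List Char) :
    (pvBuckets l).Pairwise (fun a b => a ≤ b) := by
  unfold pvBuckets
  rw [List.flatMap, List.pairwise_flatten]
  constructor
  · intro l' hl'
    simp only [List.mem_map] at hl'
    obtain ⟨k, _, rfl⟩ := hl'
    rw [List.pairwise_replicate]
    exact Or.inr le_rfl
  · rw [List.pairwise_map]
    rw [List.pairwise_iff_getElem]
    intro i j hi hj hij
    simp only [List.getElem_range] at *
    intro x hx y hy
    rw [List.eq_of_mem_replicate hx, List.eq_of_mem_replicate hy]
    have hle : (Char.ofNat i).toNat ≤ (Char.ofNat j).toNat := by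
      rw [pv_toNat_ofNat i (by simpa using hi), pv_toNat_ofNat j (by simpa using hj)]
      omega
    exact Char.le_def.mpr hle

theorem pvBuckets_perm (l : List Char) (h : ∀ c ∈ l, c.toNat < 128) :
    (pvBuckets l).Perm l := by
  rw [List.perm_iff_count]; exact fun a => pvBuckets_count l h a

theorem pv_sorted_eq_buckets (l : List Char) (h : ∀ c ∈ l, c.toNat < 128) :
    PySem.List.sorted l (fun c => c) false = pvBuckets l :=
  PySem.List.sorted_id_eq_of_perm_of_pairwise l (pvBuckets l) (pvBuckets_perm l h) (pvBuckets_pairwise l)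

theorem pvB_s_eq (l : List Char) :
    (PySem.List.pyRange 0 128 1).foldl
      (fun acc c => acc ++ PySem.List.pyRepeat [Char.ofNat c.toNat] ((l.count (Char.ofNat c.toNat) : Int)))
      ([] : List Char) = pvBuckets l := by
  rw [PySem.List.foldl_append_eq_flatMap, PySem.List.pyRange_one]
  rw [List.flatMap_map, List.nil_append]
  unfold pvBuckets
  apply List.flatMap_congr
  intro k hk
  simp [PySem.List.pyRepeat_singleton]
def pvLow (l : List Char) : List Char :=
  (List.range 48).flatMap (fun k => List.replicate (l.count (Char.ofNat k)) (Char.ofNat k))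
def pvHigh (l : List Char) : List Char :=
  (List.range 79).flatMap (fun k => List.replicate (l.count (Char.ofNat (49 + k))) (Char.ofNat (49 + k)))

theorem pvBuckets_decomp (l : List Char) :
    pvBuckets l = pvLow l ++ List.replicate (l.count '0') '0' ++ pvHigh l := by
  unfold pvBuckets pvLow pvHigh
  rw [show (128 : Nat) = 49 + 79 from rfl, List.range_add,
      show (49 : Nat) = 48 + 1 from rfl, List.range_add, List.range_one]
  rw [List.flatMap_append, List.flatMap_append, List.flatMap_map, List.flatMap_map]
  simp [show Char.ofNat 48 = '0' by decide]

theorem pv_mem_low (l : List Char) (e : Char) (he : e ∈ pvLow l) : e.toNat < 48 := by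
  unfold pvLow at he
  simp only [List.mem_flatMap, List.mem_range] at he
  obtain ⟨k, hk, hmem⟩ := he
  rw [List.eq_of_mem_replicate hmem, pv_toNat_ofNat k (by omega)]
  exact hk

theorem pv_mem_high (l : List Char) (e : Char) (he : e ∈ pvHigh l) : 48 < e.toNat := by
  unfold pvHigh at he
  simp only [List.mem_flatMap, List.mem_range] at he
  obtain ⟨k, hk, hmem⟩ := he
  rw [List.eq_of_mem_replicate hmem, pv_toNat_ofNat (49 + k) (by omega)]
  omega

theorem pvSwapA_all_zero (ds : List Char) (r : List Int)
    (h : ∀ i ∈ r, PySem.List.pyGetD ds i ' ' = '0') : pvSwapA ds r = ds := by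
  induction r with
  | nil => rfl
  | cons i rest ih =>
    unfold pvSwapA
    rw [if_neg (by simp [h i (by simp)]), ih (fun j hj => h j (by simp [hj]))]

theorem pvSwapA_skip (ds : List Char) (r1 r2 : List Int)
    (h : ∀ i ∈ r1, PySem.List.pyGetD ds i ' ' = '0') :
    pvSwapA ds (r1 ++ r2) = pvSwapA ds r2 := by
  induction r1 with
  | nil => rfl
  | cons i rest ih =>
    simp only [List.cons_append]
    unfold pvSwapA
    rw [if_neg (by simp [h i (by simp)]), ih (fun j hj => h j (by simp [hj]))]
    cases r2 <;> rfl


theorem pv_core (l : List Char) :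
    (match PySem.List.pyGet? (pvBuckets l) 0 with
     | none => ""
     | some d0 =>
       String.mk (if d0 = '0'
         then pvSwapA (pvBuckets l) (PySem.List.pyRange 1 (PySem.List.len (pvBuckets l)) 1)
         else pvBuckets l))
    = String.mk (if PySem.List.slice (pvBuckets l) none (some 1) = ['0'] ∧
          ((l.count '0' : Int)) < PySem.List.len (pvBuckets l)
        then [PySem.List.pyGetD (pvBuckets l) ((l.count '0' : Int)) ' ']
             ++ PySem.List.pyRepeat ['0'] ((l.count '0' : Int))
             ++ PySem.List.slice (pvBuckets l) (some ((l.count '0' : Int) + 1)) none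
        else pvBuckets l) := by
  have hdec := pvBuckets_decomp l
  cases hL : pvLow l with
  | cons e t' =>
    -- the sorted list starts with a character below '0'; neither side changes anything
    have he : e.toNat < 48 := pv_mem_low l e (by rw [hL]; simp)
    have hene : e ≠ '0' := by intro h; rw [h] at he; simp at he
    rw [hL] at hdec
    rw [hdec]
    simp only [List.cons_append, List.append_assoc]
    rw [show PySem.List.pyGet? (e :: (t' ++ (List.replicate (l.count '0') '0' ++ pvHigh l))) 0 = some e by norm_num [PySem.List.pyGet?, PySem.List.pyIdx?]; (try rw [if_pos (by positivity)]); try simp]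
    dsimp only
    rw [if_neg hene, if_neg]
    intro hcond
    have h1 := hcond.1
    rw [PySem.List.slice_to _ (by norm_num)] at h1
    simp at h1
    exact hene h1
  | nil =>
    rw [hL, List.nil_append] at hdec
    cases hH : pvHigh l with
    | nil =>
      -- all characters are '0' (or the list is empty)
      rw [hH, List.append_nil] at hdec
      rw [hdec]
      cases hz : l.count '0' with
      | zero =>
        simp [PySem.List.pyGet?, PySem.List.pyIdx?, PySem.List.slice]
        decide
      | succ z' =>
        rw [show PySem.List.pyGet? (List.replicate (z' + 1) '0') 0 = some '0' by
          norm_num [List.replicate_succ, PySem.List.pyGet?, PySem.List.pyIdx?]]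
        dsimp only
        rw [if_pos rfl, if_neg, pvSwapA_all_zero]
        · intro i hi
          rw [PySem.List.mem_pyRange_one] at hi
          simp only [PySem.List.len_eq, List.length_replicate] at hi
          rw [PySem.List.pyGetD_eq_getElem _ _ (by omega) (by simp <;> omega)]
          simp
        · intro hcond
          have h2 := hcond.2
          simp at h2
    | cons c rest =>
      have hc48 : 48 < c.toNat := pv_mem_high l c (by rw [hH]; simp)
      have hcne : c ≠ '0' := by intro h; rw [h] at hc48; simp at hc48
      rw [hH] at hdec
      cases hz : l.count '0' with
      | zero =>
        -- no zeros at all: head is c ≠ '0', neither side changes anything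
        rw [hz] at hdec
        simp only [List.replicate_zero, List.nil_append] at hdec
        rw [hdec]
        rw [show PySem.List.pyGet? (c :: rest) 0 = some c by norm_num [PySem.List.pyGet?, PySem.List.pyIdx?]]
        dsimp only
        rw [if_neg hcne, if_neg]
        intro hcond
        have h1 := hcond.1
        rw [PySem.List.slice_to _ (by norm_num)] at h1
        simp at h1
        exact hcne h1
      | succ z' =>
        rw [hz] at hdec
        rw [hdec]
        have hlen : (PySem.List.len (List.replicate (z' + 1) '0' ++ c :: rest)) = ((z' + 1 + (rest.length + 1) : Nat) : Int) := by
          simp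
        have hgc : PySem.List.pyGetD (List.replicate (z' + 1) '0' ++ c :: rest) ((z' + 1 : Nat) : Int) ' ' = c := by
          rw [PySem.List.pyGetD_natCast]
          rw [List.getD_append_right _ _ _ _ (by simp)]
          simp
        rw [show PySem.List.pyGet? (List.replicate (z' + 1) '0' ++ c :: rest) 0 = some '0' by
          norm_num [List.replicate_succ, PySem.List.pyGet?, PySem.List.pyIdx?]; (try rw [if_pos (by positivity)]); try simp]
        dsimp only
        rw [if_pos rfl]
        rw [PySem.List.pyRange_one_append 1 ((z' + 1 : Nat) : Int) _ (by omega) (by simp <;> omega)]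
        rw [pvSwapA_skip]
        · rw [PySem.List.pyRange_one_cons (by rw [hlen]; omega)]
          unfold pvSwapA
          rw [if_pos (by push_cast at hgc ⊢; rw [hgc]; simpa using hcne)]
          rw [if_pos ⟨by rw [PySem.List.slice_to _ (by norm_num)]; simp [List.replicate_succ], by rw [hlen]; push_cast; omega⟩]
          push_cast at hgc ⊢
          rw [hgc]
          rw [show ((z' : Int) + 1 + 1) = ((z' + 2 : Nat) : Int) by push_cast; ring]
          rw [PySem.List.slice_from_natCast, PySem.List.pyRepeat_singleton]
          rw [List.drop_append]
          simp only [List.replicate_succ, List.set_cons_zero, List.cons_append]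
          rw [show ((z' : Int) + 1).toNat = z' + 1 by omega]
          rw [List.set_cons_succ, List.set_append_right _ _ (by simp)]
          simp [List.replicate_succ']
        · intro i hi
          rw [PySem.List.mem_pyRange_one] at hi
          rw [PySem.List.pyGetD_eq_getElem _ _ (by omega) (by simp <;> omega)]
          rw [List.getElem_append_left (by simp; omega)]
          simp

-- ===== VERDICT (by name: the statement is the Claim_ definition above) =====
theorem find_min_number_spec : Claim_equal_find_min_number := by
  intro x hdom hpre
  unfold Spec_find_min_number find_min_number find_min_number_alt
  have h128 : ∀ c ∈ x.toList, c.toNat < 128 := by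
    intro c hc
    have hall : ∀ c ∈ x.toList, pvDomChar c = true := by
      simpa [Dom_find_min_number, pvDomStr, List.all_eq_true] using hdom
    have := hall c hc
    simp [pvDomChar] at this
    omega
  simp only [pv_sorted_eq_buckets x.toList h128,
    PySem.Dict.getD_foldl_modify_add_one, PySem.Dict.getD_empty, zero_add, pvB_s_eq]
  exact pv_core x.toList
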